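-- pv_equiv track=rewrite | github.com/redme07/Python-Codingal | lesson 60/barcode.py | itemprice
-- ===== SOURCE A (Python) =====
-- def itemprice(barcode):
--
--     empty = []
--     for i in barcode:
--         n = ord(i)
--         if n // 10:
--             max = 0
--             while n>0:
--                 if n%10 > max:
--                     max = n%10
--
--                 n = n//10
--             empty.append(max)
--         else:
--             empty.append(n)
--
--     return sum(empty)
-- ===== SOURCE B (Python) =====
-- def itemprice(barcode):
--     return sum(max(int(d) for d in str(ord(c))) for c in barcode)
-- ===== Notes on version B (the rewrite author's own statement) =====
-- stated objective: simpler
-- what changed: Replaces the per-character mod/div digit-peeling while-loop and its single-digit special-case branch with taking the max over the digits of str(ord(c)), summed in one comprehension.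
import Mathlib
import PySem

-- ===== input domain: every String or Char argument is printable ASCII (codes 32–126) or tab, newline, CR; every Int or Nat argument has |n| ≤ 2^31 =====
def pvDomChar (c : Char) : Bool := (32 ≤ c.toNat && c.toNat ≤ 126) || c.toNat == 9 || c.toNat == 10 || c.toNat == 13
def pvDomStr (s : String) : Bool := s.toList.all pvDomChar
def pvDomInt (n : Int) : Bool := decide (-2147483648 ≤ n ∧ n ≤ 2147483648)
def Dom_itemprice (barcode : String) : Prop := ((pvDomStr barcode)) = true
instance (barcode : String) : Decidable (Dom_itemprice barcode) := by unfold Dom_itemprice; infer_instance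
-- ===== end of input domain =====

-- B replaces A's mod/div digit-peeling while-loop (and its one-digit special case) with the
-- max over the digits of str(ord(c)); this file proves the two return the same sum on Dom.

-- ===== PORT A =====
-- A's `while n>0` loop, fuel-indexed (called with fuel = n.toNat, always sufficient since
-- n is halved-by-ten each step); exact transliteration of the loop body.
def pyWhileMax : Nat → Int → Int → Int
  | 0, _, m => m
  | fuel + 1, n, m =>
    if n > 0 then
      pyWhileMax fuel (PySem.Int.floordiv n 10)
        (if PySem.Int.mod n 10 > m then PySem.Int.mod n 10 else m)
    else m

def itemprice (barcode : String) : Int :=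
  let empty := barcode.toList.foldl (fun acc i =>
    let n : Int := i.toNat                         -- ord(i)
    if PySem.Int.floordiv n 10 ≠ 0 then            -- if n // 10:
      acc ++ [pyWhileMax n.toNat n 0]
    else
      acc ++ [n]) ([] : List Int)
  empty.sum

-- ===== PORT B =====
def itemprice_alt (barcode : String) : Int :=
  barcode.toList.foldl (fun acc c =>
    -- max(int(d) for d in str(ord(c))); str(n) is nonempty and its chars are digits,
    -- so max? is some and ofStr? parses: the .getD 0 defaults are unreachable
    let digits := (PySem.Int.toStr ((c.toNat : Int))).toList.map
      (fun d => (PySem.Int.ofStr? (String.ofList [d])).getD 0)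
    acc + (PySem.List.max? digits (fun x => x)).getD 0) 0

-- ===== PRECONDITION & SPEC =====
def Spec_itemprice (barcode : String) (out : Int) : Prop := out = itemprice_alt barcode
instance (barcode : String) (out : Int) : Decidable (Spec_itemprice barcode out) := by unfold Spec_itemprice; infer_instance

-- ===== CLAIM (what is proved, stated in full; the proofs are below) =====
def Claim_equal_itemprice : Prop := ∀ (barcode : String), Dom_itemprice barcode → Spec_itemprice barcode (itemprice barcode)

-- ===== LEMMAS AND PROOFS =====

-- per-character value of A's loop body
def pvFA (k : Nat) : Int :=
  if PySem.Int.floordiv (k : Int) 10 ≠ 0 then pyWhileMax (k : Int).toNat (k : Int) 0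
  else (k : Int)

-- per-character value of B's loop body
def pvFB (k : Nat) : Int :=
  (PySem.List.max? ((PySem.Int.toStr (k : Int)).toList.map
    (fun d => (PySem.Int.ofStr? (String.ofList [d])).getD 0)) (fun x => x)).getD 0

theorem pvFA_eq_pvFB : ∀ k : Nat, k < 127 → pvFA k = pvFB k := by decide

theorem stepA_eq (acc : List Int) (c : Char) :
    (let n : Int := c.toNat
     if PySem.Int.floordiv n 10 ≠ 0 then acc ++ [pyWhileMax n.toNat n 0]
     else acc ++ [n]) = acc ++ [pvFA c.toNat] := by
  simp only [pvFA]
  split <;> simp_all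

theorem foldA_sum (l : List Char) (acc : List Int) :
    (l.foldl (fun acc i =>
       let n : Int := i.toNat
       if PySem.Int.floordiv n 10 ≠ 0 then acc ++ [pyWhileMax n.toNat n 0]
       else acc ++ [n]) acc).sum = acc.sum + (l.map (fun c => pvFA c.toNat)).sum := by
  induction l generalizing acc with
  | nil => simp
  | cons c t ih =>
    simp only [List.foldl_cons, List.map_cons, List.sum_cons]
    rw [stepA_eq, ih]
    simp [add_assoc]

theorem foldB_sum (l : List Char) (acc : Int) :
    (l.foldl (fun acc c =>
       let digits := (PySem.Int.toStr ((c.toNat : Int))).toList.map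
         (fun d => (PySem.Int.ofStr? (String.ofList [d])).getD 0)
       acc + (PySem.List.max? digits (fun x => x)).getD 0) acc)
      = acc + (l.map (fun c => pvFB c.toNat)).sum := by
  induction l generalizing acc with
  | nil => simp
  | cons c t ih =>
    simp only [List.foldl_cons, List.map_cons, List.sum_cons]
    rw [ih, pvFB]
    ring

-- ===== VERDICT (by name: the statement is the Claim_ definition above) =====
theorem itemprice_spec : Claim_equal_itemprice := by
  intro barcode hdom
  unfold Spec_itemprice itemprice itemprice_alt
  rw [foldA_sum, foldB_sum]
  simp only [List.sum_nil, zero_add]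
  congr 1
  apply List.map_congr_left
  intro c hc
  apply pvFA_eq_pvFB
  have := (List.all_eq_true.mp hdom) c hc
  unfold pvDomChar at this
  simp only [Bool.or_eq_true, Bool.and_eq_true, decide_eq_true_eq, beq_iff_eq] at this
  omega
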